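-- pv_equiv track=rewrite | github.com/mirimSunwoo/sunwoo-coding-test-study | COSPro/모의고사3회/practice4.py | solution
-- ===== SOURCE A (Python) =====
-- def solution(walls):
--     answer = 0
--     painted_walls = 0
--     hour = 1
--     while painted_walls<walls:
--         painted_walls = (hour) + (hour//2) + (hour//4)
--         hour += 1
--     answer = painted_walls
--     return hour -1
-- ===== SOURCE B (Python) =====
-- def solution(walls):
--     if walls <= 0:
--         return 0
--     lo, hi = 1, walls
--     while lo < hi:
--         mid = (lo + hi) // 2
--         if mid + mid // 2 + mid // 4 >= walls:
--             hi = mid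
--         else:
--             lo = mid + 1
--     return lo
-- ===== Notes on version B (the rewrite author's own statement) =====
-- stated objective: faster
-- what changed: Replaced the linear scan that increments hour until hour+hour//2+hour//4 reaches walls by a binary search over the monotone painted-walls function.
import Mathlib
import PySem

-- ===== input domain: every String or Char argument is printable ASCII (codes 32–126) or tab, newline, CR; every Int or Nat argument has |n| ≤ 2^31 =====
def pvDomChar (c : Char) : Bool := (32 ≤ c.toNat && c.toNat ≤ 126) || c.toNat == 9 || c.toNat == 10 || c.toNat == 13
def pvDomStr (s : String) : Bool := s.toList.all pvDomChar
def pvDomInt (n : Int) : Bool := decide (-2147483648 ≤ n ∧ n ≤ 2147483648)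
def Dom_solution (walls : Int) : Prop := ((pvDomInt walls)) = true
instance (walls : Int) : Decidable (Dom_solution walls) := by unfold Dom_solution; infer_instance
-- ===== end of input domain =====

-- B replaces A's linear hour-by-hour scan with a binary search over the monotone
-- painted-walls function; return values proved equal for every Int input.

-- ===== PORT A =====
-- termination lemma for A's loop (cited by name in decreasing_by)
theorem solutionLoop_dec {walls painted hour : Int} (h : painted < walls) :
    2 * ((walls - (hour + 1)).toNat + (-(hour + 1)).toNat) +
      (if hour + PySem.Int.floordiv hour 2 + PySem.Int.floordiv hour 4 < walls then 1 else 0) <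
    2 * ((walls - hour).toNat + (-hour).toNat) + (if painted < walls then 1 else 0) := by
  simp only [PySem.Int.floordiv_eq_ediv_of_pos (a := hour) (b := 2) (by omega),
    PySem.Int.floordiv_eq_ediv_of_pos (a := hour) (b := 4) (by omega)]
  split_ifs <;> omega

-- A's while loop: state (painted_walls, hour); terminates because hour grows and
-- hour + hour//2 + hour//4 eventually reaches walls.
def solutionLoop (walls painted hour : Int) : Int :=
  if painted < walls then
    solutionLoop walls
      (hour + PySem.Int.floordiv hour 2 + PySem.Int.floordiv hour 4) (hour + 1)
  else hour - 1
termination_by 2 * ((walls - hour).toNat + (-hour).toNat) +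
  (if painted < walls then 1 else 0)
decreasing_by exact solutionLoop_dec (by assumption)

def solution (walls : Int) : Int :=
  solutionLoop walls 0 1

-- ===== PORT B =====
-- termination lemmas for B's binary search (cited by name in decreasing_by)
theorem solutionAltLoop_dec1 {lo hi : Int} (h : lo < hi) :
    (PySem.Int.floordiv (lo + hi) 2 - lo).toNat < (hi - lo).toNat := by
  rw [PySem.Int.floordiv_eq_ediv_of_pos (a := lo + hi) (b := 2) (by omega)]
  omega

theorem solutionAltLoop_dec2 {lo hi : Int} (h : lo < hi) :
    (hi - (PySem.Int.floordiv (lo + hi) 2 + 1)).toNat < (hi - lo).toNat := by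
  rw [PySem.Int.floordiv_eq_ediv_of_pos (a := lo + hi) (b := 2) (by omega)]
  omega

def solutionAltLoop (walls lo hi : Int) : Int :=
  if lo < hi then
    let mid := PySem.Int.floordiv (lo + hi) 2
    if mid + PySem.Int.floordiv mid 2 + PySem.Int.floordiv mid 4 ≥ walls then
      solutionAltLoop walls lo mid
    else
      solutionAltLoop walls (mid + 1) hi
  else lo
termination_by (hi - lo).toNat
decreasing_by
  · exact solutionAltLoop_dec1 (by assumption)
  · exact solutionAltLoop_dec2 (by assumption)

def solution_alt (walls : Int) : Int :=
  if walls ≤ 0 then 0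
  else solutionAltLoop walls 1 walls

-- ===== PRECONDITION & SPEC =====
def Spec_solution (walls : Int) (out : Int) : Prop := out = solution_alt walls
instance (walls : Int) (out : Int) : Decidable (Spec_solution walls out) := by unfold Spec_solution; infer_instance

-- ===== CLAIM (what is proved, stated in full; the proofs are below) =====
def Claim_equal_solution : Prop := ∀ (walls : Int), Dom_solution walls → Spec_solution walls (solution walls)

-- ===== LEMMAS AND PROOFS =====

-- the painted-walls function
def pvF (h : Int) : Int := h + PySem.Int.floordiv h 2 + PySem.Int.floordiv h 4

theorem pvF_eq (h : Int) : pvF h = h + h / 2 + h / 4 := by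
  unfold pvF
  rw [PySem.Int.floordiv_eq_ediv_of_pos (a := h) (b := 2) (by omega),
      PySem.Int.floordiv_eq_ediv_of_pos (a := h) (b := 4) (by omega)]

-- both programs return the unique r with 1 ≤ r, pvF (r-1) < walls ≤ pvF r (for walls ≥ 1)
def IsAns (walls r : Int) : Prop := 1 ≤ r ∧ walls ≤ pvF r ∧ pvF (r - 1) < walls

theorem pvF_mono {a b : Int} (h : a ≤ b) : pvF a ≤ pvF b := by
  have h2 := Int.ediv_le_ediv (by omega : (0:Int) < 2) h
  have h4 := Int.ediv_le_ediv (by omega : (0:Int) < 4) h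
  simp only [pvF_eq]
  omega

theorem isAns_unique {walls r s : Int} (hr : IsAns walls r) (hs : IsAns walls s) : r = s := by
  obtain ⟨hr1, hr2, hr3⟩ := hr
  obtain ⟨hs1, hs2, hs3⟩ := hs
  rcases lt_trichotomy r s with h | h | h
  · have := pvF_mono (by omega : r ≤ s - 1)
    omega
  · exact h
  · have := pvF_mono (by omega : s ≤ r - 1)
    omega

theorem solutionLoop_isAns (walls : Int) (hw : 1 ≤ walls) :
    ∀ hour painted, 1 ≤ hour → painted = pvF (hour - 1) → pvF (hour - 2) < walls →
      IsAns walls (solutionLoop walls painted hour) := by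
  intro hour painted
  fun_induction solutionLoop walls painted hour with
  | case1 painted hour hlt ih =>
    intro h1 hp hprev
    exact ih (by omega) (by simp [pvF]) (by rw [show hour + 1 - 2 = hour - 1 by ring, ← hp]; exact hlt)
  | case2 painted hour hlt =>
    intro h1 hp hprev
    subst hp
    push Not at hlt
    refine ⟨?_, by simpa using hlt, by rw [show hour - 1 - 1 = hour - 2 by ring]; exact hprev⟩
    -- 1 ≤ hour - 1 : pvF (hour - 1) ≥ walls ≥ 1 while pvF 0 = 0, pvF monotone
    by_contra hcon
    have : pvF (hour - 1) ≤ 0 := by rw [pvF_eq]; omega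
    omega

theorem solutionAltLoop_isAns (walls : Int) :
    ∀ lo hi, 1 ≤ lo → lo ≤ hi → pvF (lo - 1) < walls → walls ≤ pvF hi →
      IsAns walls (solutionAltLoop walls lo hi) := by
  intro lo hi
  fun_induction solutionAltLoop walls lo hi with
  | case1 lo hi hlt mid hge ih =>
    intro h1 hle hlo hhi
    have hmid : lo ≤ mid ∧ mid ≤ hi := by
      constructor <;> simp only [mid,
        PySem.Int.floordiv_eq_ediv_of_pos (a := lo + hi) (b := 2) (by omega)] <;> omega
    exact ih h1 hmid.1 hlo (by simpa [pvF] using hge)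
  | case2 lo hi hlt mid hge ih =>
    intro h1 hle hlo hhi
    have hmid : lo ≤ mid ∧ mid < hi := by
      constructor <;> simp only [mid,
        PySem.Int.floordiv_eq_ediv_of_pos (a := lo + hi) (b := 2) (by omega)] <;> omega
    push Not at hge
    exact ih (by omega) (by omega) (by simpa [pvF] using hge) hhi
  | case3 lo hi hlt =>
    intro h1 hle hlo hhi
    have : lo = hi := by omega
    exact ⟨h1, this ▸ hhi, hlo⟩

-- ===== VERDICT (by name: the statement is the Claim_ definition above) =====
theorem solution_spec : Claim_equal_solution := by
  intro walls _
  unfold Spec_solution solution solution_alt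
  by_cases hw : walls ≤ 0
  · rw [if_pos hw, solutionLoop, if_neg (by omega : ¬ ((0:Int) < walls))]
    norm_num
  · rw [if_neg hw]
    push Not at hw
    have hA := solutionLoop_isAns walls (by omega) 1 0 (by omega)
      (by rw [pvF_eq]; omega) (by rw [pvF_eq]; omega)
    have hB := solutionAltLoop_isAns walls 1 walls (by omega) (by omega)
      (by rw [pvF_eq]; omega) (by rw [pvF_eq]; omega)
    exact isAns_unique hA hB
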